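-- pv_equiv track=rewrite | github.com/vktrv/Regular_expressions | main.py | change_final_list
-- ===== SOURCE A (Python) =====
-- def change_final_list(list_cont):
--     final_list = []
--     for i in range(len(list_cont)):
--         for j in range(len(list_cont)):
--             if list_cont[i][0] == list_cont[j][0]:
--                 list_cont[i] = [x or y for x, y in zip(list_cont[i], list_cont[j])]
--         if list_cont[i] not in final_list:
--             final_list.append(list_cont[i])
--     return final_list
-- ===== SOURCE B (Python) =====
-- def change_final_list(list_cont):
--     # One pass: per first-element key, accumulate the element-wise
--     # "first non-zero" profile (zip truncates to the group's min length).
--     prof = {}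
--     for row in list_cont:
--         k = row[0]
--         if k in prof:
--             prof[k] = [x if x != 0 else y for x, y in zip(prof[k], row)]
--         else:
--             prof[k] = list(row)
--     # Second pass: each row merged against its group profile; dedupe in order.
--     final_list = []
--     seen = set()
--     for row in list_cont:
--         p = prof[row[0]]
--         merged = [x if x != 0 else y for x, y in zip(row, p)]
--         t = tuple(merged)
--         if t not in seen:
--             seen.add(t)
--             final_list.append(merged)
--     return final_list
-- ===== Notes on version B (the rewrite author's own statement) =====
-- stated objective: faster
-- what changed: Replaced the O(n^2) all-pairs index scan with in-place row rewriting by a two-pass dictionary grouping: one pass accumulates per-first-element 'first non-zero' profiles, a second pass merges each row against its group profile and dedupes with a seen-set; B does not mutate its argument (A does).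
import Mathlib
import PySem

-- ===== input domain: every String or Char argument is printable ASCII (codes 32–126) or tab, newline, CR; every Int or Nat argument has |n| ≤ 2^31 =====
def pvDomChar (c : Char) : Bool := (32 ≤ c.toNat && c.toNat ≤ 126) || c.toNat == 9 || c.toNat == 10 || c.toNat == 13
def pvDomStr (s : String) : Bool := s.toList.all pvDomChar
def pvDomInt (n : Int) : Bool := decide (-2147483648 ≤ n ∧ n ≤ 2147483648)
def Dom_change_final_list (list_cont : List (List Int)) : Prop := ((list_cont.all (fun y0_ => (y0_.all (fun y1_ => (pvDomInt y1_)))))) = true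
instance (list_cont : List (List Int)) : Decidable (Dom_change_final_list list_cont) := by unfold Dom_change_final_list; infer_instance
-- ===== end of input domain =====

-- B replaces A's quadratic all-pairs in-place merging with a two-pass dict grouping (objective: faster).
-- A mutates its argument in place; B does not — the equivalence proved here is about the RETURN value only.

-- `[x or y for x, y in zip(xs, ys)]` on ints (also `x if x != 0 else y`): both Pythons contain this comprehension.
def pvOrMerge (xs ys : List Int) : List Int :=
  (xs.zip ys).map (fun p => if p.1 ≠ 0 then p.1 else p.2)

-- ===== PORT A =====
def change_final_list (list_cont : List (List Int)) : List (List Int) :=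
  let n : Int := list_cont.length
  let st := (PySem.List.pyRange 0 n 1).foldl
    (fun (st : List (List Int) × List (List Int)) i =>
      let lc := (PySem.List.pyRange 0 n 1).foldl
        (fun lc j =>
          if PySem.List.pyGetD (PySem.List.pyGetD lc i []) 0 0 ==
             PySem.List.pyGetD (PySem.List.pyGetD lc j []) 0 0 then
            PySem.List.pySetD lc i
              (pvOrMerge (PySem.List.pyGetD lc i []) (PySem.List.pyGetD lc j []))
          else lc)
        st.1
      let row := PySem.List.pyGetD lc i []
      if st.2.contains row then (lc, st.2) else (lc, st.2 ++ [row]))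
    (list_cont, [])
  st.2

-- ===== PORT B =====
def change_final_list_alt (list_cont : List (List Int)) : List (List Int) :=
  let prof := list_cont.foldl
    (fun (prof : PySem.Dict Int (List Int)) row =>
      let k := PySem.List.pyGetD row 0 0
      if prof.contains k then
        prof.insert k (pvOrMerge (prof.getD k []) row)
      else
        prof.insert k row)
    PySem.Dict.empty
  let st := list_cont.foldl
    (fun (st : List (List Int) × PySem.Set (List Int)) row =>
      let merged := pvOrMerge row (prof.getD (PySem.List.pyGetD row 0 0) [])
      if PySem.Set.contains st.2 merged then st
      else (st.1 ++ [merged], PySem.Set.add st.2 merged))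
    ([], PySem.Set.empty)
  st.1

-- ===== PRECONDITION & SPEC =====
-- Pre_ excludes inputs containing an empty row: there `list_cont[i][0]` raises IndexError in A (and `row[0]` in B).
def Pre_change_final_list (list_cont : List (List Int)) : Prop :=
  ∀ row ∈ list_cont, row ≠ []
instance (list_cont : List (List Int)) : Decidable (Pre_change_final_list list_cont) := by
  unfold Pre_change_final_list; infer_instance

def pvWitness_change_final_list : List (List Int) := [[1, 2], [1, 0, 5], [2, 3], [0, 4]]

def Spec_change_final_list (list_cont : List (List Int)) (out : List (List Int)) : Prop := out = change_final_list_alt list_cont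
instance (list_cont : List (List Int)) (out : List (List Int)) : Decidable (Spec_change_final_list list_cont out) := by unfold Spec_change_final_list; infer_instance

-- ===== CLAIM (what is proved, stated in full; the proofs are below) =====
def Claim_equal_change_final_list : Prop := ∀ (list_cont : List (List Int)), Dom_change_final_list list_cont → Pre_change_final_list list_cont → Spec_change_final_list list_cont (change_final_list list_cont)

-- ===== LEMMAS AND PROOFS =====

-- first element (a row's grouping key), group of a key, iterated merge
def pvKey (r : List Int) : Int := r.getD 0 0

def pvGrp (l : List (List Int)) (k : Int) : List (List Int) :=
  l.filter (fun q => pvKey q == k)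

def pvBigOr (v : List Int) (rows : List (List Int)) : List Int :=
  rows.foldl pvOrMerge v

def pvBigOrAll : List (List Int) → List Int
  | [] => []
  | g :: gs => pvBigOr g gs

-- the common merged value of every row of a group
def pvMo (l : List (List Int)) (r : List Int) : List Int :=
  pvOrMerge r (pvBigOrAll (pvGrp l (pvKey r)))

-- first non-zero entry at position p, scanning rows left to right
def pvFnzAt : List (List Int) → Nat → Int
  | [], _ => 0
  | q :: t, p => if q.getD p 0 ≠ 0 then q.getD p 0 else pvFnzAt t p

def pvMlen (rows : List (List Int)) (i : Nat) : Nat :=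
  rows.foldl (fun m q => min m q.length) i

theorem pv_fnzAt_cons (q : List Int) (t : List (List Int)) (p : Nat) :
    pvFnzAt (q :: t) p = if q.getD p 0 ≠ 0 then q.getD p 0 else pvFnzAt t p := rfl

-- ---- elementwise facts about pvOrMerge / pvBigOr ----

theorem pv_len_orMerge (a b : List Int) : (pvOrMerge a b).length = min a.length b.length := by
  simp [pvOrMerge]

theorem pv_getD_orMerge (a b : List Int) (p : Nat) (hp : p < a.length) (hq : p < b.length) :
    (pvOrMerge a b).getD p 0 = if a.getD p 0 ≠ 0 then a.getD p 0 else b.getD p 0 := by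
  have hm : p < (pvOrMerge a b).length := by simp [pvOrMerge]; omega
  rw [List.getD_eq_getElem _ _ hm, List.getD_eq_getElem _ _ hp, List.getD_eq_getElem _ _ hq]
  simp [pvOrMerge]

theorem pv_orMerge_self (a : List Int) : pvOrMerge a a = a := by
  induction a with
  | nil => rfl
  | cons x t ih => simp [pvOrMerge, List.zip_cons_cons] at ih ⊢; simpa using ih

theorem pv_len_bigOr (rows : List (List Int)) (v : List Int) :
    (pvBigOr v rows).length = pvMlen rows v.length := by
  induction rows generalizing v with
  | nil => rfl
  | cons q t ih => simp [pvBigOr, pvMlen] at ih ⊢; rw [ih, pv_len_orMerge]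

theorem pv_mlen_le (rows : List (List Int)) (i : Nat) : pvMlen rows i ≤ i := by
  induction rows generalizing i with
  | nil => simp [pvMlen]
  | cons q t ih =>
    simp only [pvMlen, List.foldl_cons] at ih ⊢
    exact le_trans (ih _) (by omega)

theorem pv_mlen_le_of_mem (rows : List (List Int)) (i : Nat) (q : List Int) (hq : q ∈ rows) :
    pvMlen rows i ≤ q.length := by
  induction rows generalizing i with
  | nil => simp at hq
  | cons a t ih =>
    simp only [pvMlen, List.foldl_cons] at ih ⊢
    rcases List.mem_cons.mp hq with h | h
    · subst h; exact le_trans (pv_mlen_le t _) (by omega)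
    · exact ih _ h

theorem pv_le_mlen (rows : List (List Int)) (i c : Nat) (hc : c ≤ i)
    (h : ∀ q ∈ rows, c ≤ q.length) : c ≤ pvMlen rows i := by
  induction rows generalizing i with
  | nil => simpa [pvMlen]
  | cons a t ih =>
    simp only [pvMlen, List.foldl_cons] at ih ⊢
    exact ih _ (by have := h a (by simp); omega) (fun q hq => h q (by simp [hq]))

theorem pv_getD_bigOr (rows : List (List Int)) (v : List Int) (p : Nat)
    (hp : p < v.length) (h : ∀ q ∈ rows, p < q.length) :
    (pvBigOr v rows).getD p 0 = if v.getD p 0 ≠ 0 then v.getD p 0 else pvFnzAt rows p := by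
  induction rows generalizing v with
  | nil =>
    simp only [pvBigOr, List.foldl_nil, pvFnzAt]
    split_ifs <;> omega
  | cons q t ih =>
    have hq : p < q.length := h q (by simp)
    have hm : p < (pvOrMerge v q).length := by simp [pvOrMerge]; omega
    simp only [pvBigOr, List.foldl_cons] at ih ⊢
    rw [ih (pvOrMerge v q) hm (fun q hq => h q (by simp [hq])),
        pv_getD_orMerge v q p hp hq]
    simp only [pvFnzAt]
    split_ifs <;> simp_all

theorem pv_fnzAt_eq_zero (t : List (List Int)) (p : Nat) :
    pvFnzAt t p = 0 ↔ ∀ q ∈ t, q.getD p 0 = 0 := by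
  induction t with
  | nil => simp [pvFnzAt]
  | cons q t ih => simp only [pvFnzAt]; split_ifs with h <;> simp_all

-- ---- the heart: merging a row with the rows of its group, some already merged ----

theorem pv_main (pre suf : List (List Int)) (r F : List Int)
    (hF : F = pvBigOrAll (pre ++ r :: suf)) :
    pvBigOr r (pre.map (fun q => pvOrMerge q F) ++ suf) = pvOrMerge r F := by
  rcases pre with _ | ⟨g, gs⟩
  · -- no already-merged rows: F is the fold of r and suf itself
    simp only [pvBigOrAll, List.nil_append, List.map_nil] at hF ⊢
    subst hF
    have hlen : (pvBigOr r suf).length ≤ r.length := by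
      rw [pv_len_bigOr]; exact pv_mlen_le _ _
    have hsuf : ∀ q ∈ suf, (pvBigOr r suf).length ≤ q.length := by
      intro q hq; rw [pv_len_bigOr]; exact pv_mlen_le_of_mem _ _ _ hq
    apply List.ext_getElem
    · rw [pv_len_orMerge]; omega
    · intro p h1 h2
      rw [← List.getD_eq_getElem _ 0 h1, ← List.getD_eq_getElem _ 0 h2,
          pv_getD_orMerge r _ p (by omega) h1,
          pv_getD_bigOr suf r p (by omega) (fun q hq => by have := hsuf q hq; omega)]
      split_ifs with h <;> rfl
  · -- some rows already merged: each carries the full profile F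
    have hF' : F = pvBigOr g (gs ++ r :: suf) := hF
    have hFlen : F.length = pvMlen (gs ++ r :: suf) g.length := by rw [hF', pv_len_bigOr]
    have hFr : F.length ≤ r.length := by
      rw [hFlen]; exact pv_mlen_le_of_mem _ _ _ (by simp)
    have hFg : F.length ≤ g.length := by rw [hFlen]; exact pv_mlen_le _ _
    have hFq : ∀ q ∈ gs, F.length ≤ q.length := by
      intro q hq; rw [hFlen]; exact pv_mlen_le_of_mem _ _ _ (by simp [hq])
    have hFs : ∀ s ∈ suf, F.length ≤ s.length := by
      intro s hs; rw [hFlen]; exact pv_mlen_le_of_mem _ _ _ (by simp [hs])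
    have hLlen : (pvBigOr r ((g :: gs).map (fun q => pvOrMerge q F) ++ suf)).length = F.length := by
      rw [pv_len_bigOr]
      apply le_antisymm
      · calc pvMlen ((g :: gs).map (fun q => pvOrMerge q F) ++ suf) r.length
            ≤ (pvOrMerge g F).length := pv_mlen_le_of_mem _ _ _ (by simp)
          _ ≤ F.length := by rw [pv_len_orMerge]; omega
      · apply pv_le_mlen _ _ _ hFr
        intro q hq
        rcases List.mem_append.mp hq with hq | hq
        · rcases List.mem_map.mp hq with ⟨q', hq', rfl⟩
          rcases List.mem_cons.mp hq' with rfl | hq'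
          · rw [pv_len_orMerge]; omega
          · have := hFq q' hq'; rw [pv_len_orMerge]; omega
        · exact hFs q hq
    have hbound : ∀ q ∈ (g :: gs).map (fun q => pvOrMerge q F) ++ suf,
        F.length ≤ q.length := by
      intro q hq
      rcases List.mem_append.mp hq with hq | hq
      · rcases List.mem_map.mp hq with ⟨q', hq', rfl⟩
        rcases List.mem_cons.mp hq' with rfl | hq'
        · rw [pv_len_orMerge]; omega
        · have := hFq q' hq'; rw [pv_len_orMerge]; omega
      · exact hFs q hq
    apply List.ext_getElem
    · rw [hLlen, pv_len_orMerge]; omega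
    · intro p h1 h2
      rw [hLlen] at h1
      rw [← List.getD_eq_getElem _ 0 (by rw [hLlen]; omega),
          ← List.getD_eq_getElem _ 0 h2,
          pv_getD_orMerge r F p (by omega) (by omega),
          pv_getD_bigOr _ r p (by omega) (fun q hq => by have := hbound q hq; omega)]
      split_ifs with h
      · rfl
      · -- r's entry at p is 0: both sides are the first non-zero of the group at p
        have hFp : F.getD p 0 = if g.getD p 0 ≠ 0 then g.getD p 0 else pvFnzAt (gs ++ r :: suf) p := by
          rw [hF']
          exact pv_getD_bigOr _ g p (by omega) (fun q hq => by
            rcases List.mem_append.mp hq with hq | hq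
            · have := hFq q hq; omega
            · rcases List.mem_cons.mp hq with rfl | hq
              · omega
              · have := hFs q hq; omega)
        have hgF : (pvOrMerge g F).getD p 0 = if g.getD p 0 ≠ 0 then g.getD p 0 else F.getD p 0 :=
          pv_getD_orMerge g F p (by omega) (by omega)
        rw [List.map_cons, List.cons_append, pv_fnzAt_cons]
        by_cases hg : g.getD p 0 = 0
        · simp only [hg, ne_eq, not_true_eq_false, if_false, ite_false, not_false_iff] at hgF hFp
          rw [hgF]
          by_cases hFz : F.getD p 0 = 0
          · have hall : ∀ q ∈ gs ++ r :: suf, q.getD p 0 = 0 :=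
              (pv_fnzAt_eq_zero _ _).mp (by rw [← hFp]; exact hFz)
            have hmap0 : pvFnzAt (gs.map (fun q => pvOrMerge q F) ++ suf) p = 0 := by
              rw [pv_fnzAt_eq_zero]
              intro q hq
              rcases List.mem_append.mp hq with hq | hq
              · rcases List.mem_map.mp hq with ⟨q', hq', rfl⟩
                rw [pv_getD_orMerge q' F p (by have := hFq q' hq'; omega) (by omega),
                   hall q' (by simp [hq']), hFz]
                simp
              · exact hall q (by simp [hq])
            rw [hFz, hmap0]
            simp
          · rw [if_pos hFz]
        · simp only [ne_eq, hg, not_false_iff, if_true, ite_true] at hgF hFp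
          rw [hgF, if_pos hg, hFp]

-- ---- keys and non-emptiness ----

theorem pv_orMerge_ne_nil (a b : List Int) (ha : a ≠ []) (hb : b ≠ []) : pvOrMerge a b ≠ [] := by
  have := pv_len_orMerge a b
  intro h
  rw [h] at this
  simp at this
  rcases a with _ | _ <;> rcases b with _ | _ <;> simp_all

theorem pv_key_orMerge (a b : List Int) (ha : a ≠ []) (hb : b ≠ []) (hk : pvKey a = pvKey b) :
    pvKey (pvOrMerge a b) = pvKey a := by
  rcases a with _ | ⟨x, a'⟩; · simp at ha
  rcases b with _ | ⟨y, b'⟩; · simp at hb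
  simp [pvKey, pvOrMerge, List.zip_cons_cons] at hk ⊢
  omega

theorem pv_bigOr_ne_key (gs : List (List Int)) (g : List Int) (k : Int)
    (hg : g ≠ []) (hgk : pvKey g = k) (h : ∀ q ∈ gs, q ≠ [] ∧ pvKey q = k) :
    pvBigOr g gs ≠ [] ∧ pvKey (pvBigOr g gs) = k := by
  induction gs generalizing g with
  | nil => exact ⟨hg, hgk⟩
  | cons q t ih =>
    have hq := h q (by simp)
    have h1 : pvOrMerge g q ≠ [] := pv_orMerge_ne_nil g q hg hq.1
    have h2 : pvKey (pvOrMerge g q) = k := by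
      rw [pv_key_orMerge g q hg hq.1 (by rw [hgk, hq.2])]; exact hgk
    exact ih (pvOrMerge g q) h1 h2 (fun q hq => h q (by simp [hq]))

theorem pv_grp_all (l : List (List Int)) (k : Int) :
    ∀ q ∈ pvGrp l k, q ∈ l ∧ pvKey q = k := by
  intro q hq
  have := List.mem_filter.mp hq
  exact ⟨this.1, by simpa using this.2⟩

theorem pv_Mo_ne_key (l : List (List Int)) (r : List Int)
    (hne : ∀ row ∈ l, row ≠ []) (hr : r ∈ l) :
    pvMo l r ≠ [] ∧ pvKey (pvMo l r) = pvKey r := by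
  have hrg : r ∈ pvGrp l (pvKey r) := List.mem_filter.mpr ⟨hr, by simp⟩
  have hgall := pv_grp_all l (pvKey r)
  rcases hgrp : pvGrp l (pvKey r) with _ | ⟨g, gs⟩
  · rw [hgrp] at hrg; simp at hrg
  · rw [hgrp] at hgall
    have hF := pv_bigOr_ne_key gs g (pvKey r)
      (hne g (hgall g (by simp)).1) (hgall g (by simp)).2
      (fun q hq => ⟨hne q (hgall q (by simp [hq])).1, (hgall q (by simp [hq])).2⟩)
    unfold pvMo
    rw [hgrp]
    have hrne : r ≠ [] := hne r hr
    refine ⟨pv_orMerge_ne_nil r _ hrne hF.1, ?_⟩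
    exact pv_key_orMerge r _ hrne hF.1 (by show pvKey r = pvKey (pvBigOr g gs); rw [hF.2])

theorem pv_bigOrAll_append_singleton (gl : List (List Int)) (q : List Int) :
    pvBigOrAll (gl ++ [q]) =
      (if gl.isEmpty then q else pvOrMerge (pvBigOrAll gl) q) := by
  rcases gl with _ | ⟨g, gs⟩
  · rfl
  · simp [pvBigOrAll, pvBigOr, List.foldl_append]

theorem pv_grp_append_singleton (l : List (List Int)) (row : List Int) (k : Int) :
    pvGrp (l ++ [row]) k = pvGrp l k ++ (if pvKey row = k then [row] else []) := by
  simp only [pvGrp, List.filter_append]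
  congr 1
  split_ifs with h <;> simp [h]

-- ---- B side: the dict fold computes the group profiles ----

theorem pv_dict (l : List (List Int)) (k : Int) :
    (l.foldl
      (fun (prof : PySem.Dict Int (List Int)) row =>
        if prof.contains (pvKey row) then
          prof.insert (pvKey row) (pvOrMerge (prof.getD (pvKey row) []) row)
        else
          prof.insert (pvKey row) row)
      PySem.Dict.empty).getD k []
      = pvBigOrAll (pvGrp l k)
    ∧ (l.foldl
      (fun (prof : PySem.Dict Int (List Int)) row =>
        if prof.contains (pvKey row) then
          prof.insert (pvKey row) (pvOrMerge (prof.getD (pvKey row) []) row)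
        else
          prof.insert (pvKey row) row)
      PySem.Dict.empty).contains k = !(pvGrp l k).isEmpty := by
  induction l using List.reverseRecOn with
  | nil => constructor <;> simp [pvGrp, pvBigOrAll, PySem.Dict.getD_empty, PySem.Dict.contains_empty]
  | append_singleton l row ih =>
    rw [List.foldl_append]
    simp only [List.foldl_cons, List.foldl_nil]
    rw [pv_grp_append_singleton]
    by_cases hk : pvKey row = k
    · subst hk
      simp only [if_pos rfl]
      rw [ih.2]
      rcases hgrp : pvGrp l (pvKey row) with _ | ⟨g, gs⟩
      · rw [hgrp] at ih
        simp only [List.isEmpty_nil, Bool.not_true, if_false, Bool.false_eq_true]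
        constructor
        · rw [PySem.Dict.getD_insert_self]; rfl
        · simp [PySem.Dict.contains_insert]
      · rw [hgrp] at ih
        simp only [List.isEmpty_cons, Bool.not_false, if_true]
        constructor
        · rw [PySem.Dict.getD_insert_self, ih.1, pv_bigOrAll_append_singleton]
          simp
        · simp [PySem.Dict.contains_insert]
    · have hne : k ≠ pvKey row := fun h => hk h.symm
      simp only [if_neg hk, List.append_nil]
      constructor
      · split_ifs with hc
        · rw [PySem.Dict.getD_insert_of_ne _ _ _ hne, ih.1]
        · rw [PySem.Dict.getD_insert_of_ne _ _ _ hne, ih.1]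
      · split_ifs with hc
        · rw [PySem.Dict.contains_insert, ih.2]; simp [hne]
        · rw [PySem.Dict.contains_insert, ih.2]; simp [hne]

-- ---- seen-set dedupe: list and set accumulators coincide ----

theorem pv_seen (m : List Int → List Int) (l : List (List Int)) (out : List (List Int)) :
    (l.foldl
      (fun (st : List (List Int) × PySem.Set (List Int)) row =>
        if PySem.Set.contains st.2 (m row) then st
        else (st.1 ++ [m row], PySem.Set.add st.2 (m row)))
      (out, out))
      = ((l.map m).foldl PySem.Set.add out, (l.map m).foldl PySem.Set.add out) := by
  induction l generalizing out with
  | nil => rfl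
  | cons r t ih =>
    simp only [List.foldl_cons, List.map_cons, PySem.Set.add, PySem.Set.contains]
    split_ifs with h <;> simp_all [PySem.Set.add, PySem.Set.contains]

-- ---- B characterised ----

theorem pv_B_char (l : List (List Int)) :
    change_final_list_alt l = (l.map (pvMo l)).foldl PySem.Set.add [] := by
  unfold change_final_list_alt
  simp only [PySem.List.pyGetD_zero]
  have hseen := pv_seen (fun row => pvOrMerge row
      ((l.foldl
        (fun (prof : PySem.Dict Int (List Int)) row =>
          if prof.contains (pvKey row) then
            prof.insert (pvKey row) (pvOrMerge (prof.getD (pvKey row) []) row)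
          else
            prof.insert (pvKey row) row)
        PySem.Dict.empty).getD (pvKey row) [])) l []
  simp only [pvKey] at hseen
  rw [show (PySem.Set.empty : PySem.Set (List Int)) = ([] : List (List Int)) from rfl, hseen]
  dsimp only
  congr 1
  apply List.map_congr_left
  intro r _
  have hd := (pv_dict l (r.getD 0 0)).1
  simp only [pvKey] at hd
  rw [hd]
  rfl

-- ---- A side: the inner loop rewrites row i to the merged group row ----

-- inner-loop body of port A, with the outer index fixed
def pvIB (i : Int) : List (List Int) → Int → List (List Int) :=
  fun lc j =>
    if PySem.List.pyGetD (PySem.List.pyGetD lc i []) 0 0 ==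
       PySem.List.pyGetD (PySem.List.pyGetD lc j []) 0 0 then
      PySem.List.pySetD lc i
        (pvOrMerge (PySem.List.pyGetD lc i []) (PySem.List.pyGetD lc j []))
    else lc

-- outer-loop body of port A
def pvOB (n : Int) : (List (List Int) × List (List Int)) → Int → (List (List Int) × List (List Int)) :=
  fun st i =>
    let lc := (PySem.List.pyRange 0 n 1).foldl (pvIB i) st.1
    let row := PySem.List.pyGetD lc i []
    if st.2.contains row then (lc, st.2) else (lc, st.2 ++ [row])

-- conditional merge of the accumulator row with a candidate row
def pvG (v q : List Int) : List Int := if pvKey v == pvKey q then pvOrMerge v q else v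

theorem pv_getD_mid (P S : List (List Int)) (v : List Int) :
    PySem.List.pyGetD (P ++ v :: S) (P.length : Int) [] = v := by
  rw [PySem.List.pyGetD_natCast]
  simp [List.getD, List.getElem?_append_right]

theorem pv_set_mid (P S : List (List Int)) (v w : List Int) :
    PySem.List.pySetD (P ++ v :: S) (P.length : Int) w = P ++ w :: S := by
  rw [PySem.List.pySetD_natCast, List.set_append_right _ _ (le_refl _)]
  rw [Nat.sub_self]
  rfl

theorem pv_getD_low (P S : List (List Int)) (v : List Int) (j : Int)
    (h0 : 0 ≤ j) (h1 : j < (P.length : Int)) :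
    PySem.List.pyGetD (P ++ v :: S) j [] = PySem.List.pyGetD P j [] := by
  rw [PySem.List.pyGetD_eq_getElem _ _ h0 (by simp; omega),
      PySem.List.pyGetD_eq_getElem _ _ h0 h1]
  rw [List.getElem_append_left]

theorem pv_getD_high (P S : List (List Int)) (v : List Int) (j : Int)
    (h0 : (P.length : Int) < j) (h1 : j < (P.length : Int) + 1 + (S.length : Int)) :
    PySem.List.pyGetD (P ++ v :: S) j [] = S.getD (j.toNat - P.length - 1) [] := by
  rw [PySem.List.pyGetD_eq_getElem _ _ (by omega) (by simp; omega)]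
  obtain ⟨m, hm⟩ : ∃ m, j.toNat - P.length = m + 1 := ⟨j.toNat - P.length - 1, by omega⟩
  have hm2 : j.toNat - P.length - 1 = m := by omega
  rw [hm2, List.getElem_append_right (by omega), List.getD_eq_getElem _ _ (by omega)]
  simp only [hm, List.getElem_cons_succ]

theorem pv_istep (P S : List (List Int)) (v : List Int) (j : Int) :
    pvIB (P.length : Int) (P ++ v :: S) j
      = P ++ (pvG v (PySem.List.pyGetD (P ++ v :: S) j [])) :: S := by
  unfold pvIB pvG pvKey
  rw [pv_getD_mid, pv_set_mid]
  simp only [PySem.List.pyGetD_zero]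
  split_ifs <;> rfl

theorem pv_inner_shape (P S : List (List Int)) (js : List Int) : ∀ (v : List Int),
    js.foldl (pvIB (P.length : Int)) (P ++ v :: S)
      = P ++ (js.foldl (fun v j => pvG v (PySem.List.pyGetD (P ++ v :: S) j [])) v) :: S := by
  induction js with
  | nil => intro v; rfl
  | cons j t ih =>
    intro v
    rw [List.foldl_cons, List.foldl_cons, pv_istep]
    exact ih _

theorem pv_scal_pre (P S : List (List Int)) (v : List Int) :
    (PySem.List.pyRange 0 (P.length : Int) 1).foldl
        (fun v j => pvG v (PySem.List.pyGetD (P ++ v :: S) j [])) v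
      = P.foldl pvG v := by
  rw [PySem.List.foldl_congr_mem _ _
      (fun v j => pvG v (PySem.List.pyGetD P j [])) _
      (fun acc x hx => by
        have hm := (PySem.List.mem_pyRange_one).mp hx
        rw [pv_getD_low P S acc x hm.1 hm.2])]
  exact PySem.List.foldl_pyRange_zero_pyGetD' P [] pvG v

theorem pv_scal_mid (P S : List (List Int)) (v : List Int) :
    pvG v (PySem.List.pyGetD (P ++ v :: S) (P.length : Int) []) = v := by
  rw [pv_getD_mid]
  simp [pvG, pv_orMerge_self]

theorem pv_scal_suf (P S : List (List Int)) (v : List Int) :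
    (PySem.List.pyRange ((P.length : Int) + 1) ((P.length : Int) + 1 + (S.length : Int)) 1).foldl
        (fun v j => pvG v (PySem.List.pyGetD (P ++ v :: S) j [])) v
      = S.foldl pvG v := by
  rw [PySem.List.foldl_congr_mem _ _
      (fun v j => pvG v (PySem.List.pyGetD (P ++ ([] : List Int) :: S) j []))  _
      (fun acc x hx => by
        have hm := (PySem.List.mem_pyRange_one).mp hx
        rw [pv_getD_high P S acc x (by omega) (by omega)]
        show _ = pvG acc (PySem.List.pyGetD (P ++ ([] : List Int) :: S) x [])
        rw [pv_getD_high P S [] x (by omega) (by omega)])]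
  have hX : ((P.length : Int) + 1 + (S.length : Int)) = ((P ++ ([] : List Int) :: S).length : Int) := by
    simp; omega
  rw [hX, PySem.List.foldl_pyRange_pyGetD' (P ++ ([] : List Int) :: S) [] pvG v
        (a := (P.length : Int) + 1) (by omega)]
  have hdrop : (P ++ ([] : List Int) :: S).drop ((P.length : Int) + 1).toNat = S := by
    have : ((P.length : Int) + 1).toNat = P.length + 1 := by omega
    rw [this]
    simp [List.drop_append]
  rw [hdrop]

theorem pv_inner_eval (P S : List (List Int)) (r : List Int) (n : Int)
    (hn : n = (P.length : Int) + 1 + (S.length : Int)) :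
    (PySem.List.pyRange 0 n 1).foldl (pvIB (P.length : Int)) (P ++ r :: S)
      = P ++ (S.foldl pvG (P.foldl pvG r)) :: S := by
  rw [pv_inner_shape]
  have hscal : (PySem.List.pyRange 0 n 1).foldl
      (fun v j => pvG v (PySem.List.pyGetD (P ++ v :: S) j [])) r
      = S.foldl pvG (P.foldl pvG r) := by
    rw [hn,
        PySem.List.pyRange_one_append 0 (P.length : Int) _ (by omega) (by omega),
        PySem.List.pyRange_one_append (P.length : Int) ((P.length : Int) + 1) _ (by omega) (by omega),
        List.foldl_append, List.foldl_append, pv_scal_pre,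
        PySem.List.pyRange_one_singleton]
    rw [List.foldl_cons, List.foldl_nil, pv_scal_mid, pv_scal_suf]
  rw [hscal]

theorem pv_keyfold (k : Int) : ∀ (t : List (List Int)) (v : List Int), v ≠ [] → pvKey v = k →
    (∀ q ∈ t, q ≠ []) →
    t.foldl pvG v = pvBigOr v (t.filter (fun q => pvKey q == k))
      ∧ t.foldl pvG v ≠ [] ∧ pvKey (t.foldl pvG v) = k := by
  intro t
  induction t with
  | nil => intro v h1 h2 _; exact ⟨rfl, h1, h2⟩
  | cons q t ih =>
    intro v hv hk hq
    have hqne : q ≠ [] := hq q (by simp)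
    by_cases hkey : pvKey q = k
    · have h1 : pvG v q = pvOrMerge v q := by
        unfold pvG; rw [if_pos (by rw [hk, hkey]; exact beq_self_eq_true k)]
      have hne' := pv_orMerge_ne_nil v q hv hqne
      have hkey' : pvKey (pvOrMerge v q) = k := by
        rw [pv_key_orMerge v q hv hqne (by rw [hk, hkey])]; exact hk
      have htest : (pvKey q == k) = true := by rw [hkey]; exact beq_self_eq_true k
      simp only [List.foldl_cons, h1, List.filter_cons, htest, if_true]
      exact ih (pvOrMerge v q) hne' hkey' (fun q hq' => hq q (by simp [hq']))
    · have h1 : pvG v q = v := by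
        unfold pvG
        rw [if_neg (by rw [hk]; simp; exact fun h => hkey h.symm)]
      have htest : (pvKey q == k) = false := by simp [hkey]
      simp only [List.foldl_cons, h1, List.filter_cons, htest, Bool.false_eq_true, if_false]
      exact ih v hv hk (fun q hq' => hq q (by simp [hq']))

theorem pv_inner_full (l : List (List Int)) (hne : ∀ row ∈ l, row ≠ []) (i : Nat)
    (hi : i < l.length) :
    (PySem.List.pyRange 0 (l.length : Int) 1).foldl (pvIB (i : Int))
        ((l.take i).map (pvMo l) ++ l.drop i)
      = (l.take (i + 1)).map (pvMo l) ++ l.drop (i + 1) := by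
  obtain ⟨r, hrdef⟩ : ∃ r, l[i] = r := ⟨l[i], rfl⟩
  have hP : ((l.take i).map (pvMo l)).length = i := by simp; omega
  have hdrop : l.drop i = r :: l.drop (i + 1) := by
    rw [List.drop_eq_getElem_cons hi, hrdef]
  have htake : l.take (i + 1) = l.take i ++ [r] := by
    rw [List.take_succ, List.getElem?_eq_getElem hi, hrdef]
    rfl
  have hr : r ∈ l := hrdef ▸ List.getElem_mem hi
  have hrne : r ≠ [] := hne _ hr
  have hPne : ∀ q ∈ (l.take i).map (pvMo l), q ≠ [] := by
    intro q hq
    rcases List.mem_map.mp hq with ⟨q', hq', rfl⟩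
    exact (pv_Mo_ne_key l q' hne (List.take_subset _ _ hq')).1
  have hSne : ∀ q ∈ l.drop (i + 1), q ≠ [] := fun q hq => hne q (List.drop_subset _ _ hq)
  have kf1 := pv_keyfold (pvKey r) ((l.take i).map (pvMo l)) r hrne rfl hPne
  have kf2 := pv_keyfold (pvKey r) (l.drop (i + 1))
      (((l.take i).map (pvMo l)).foldl pvG r) kf1.2.1 kf1.2.2 hSne
  have hsplit : pvGrp l (pvKey r)
      = pvGrp (l.take i) (pvKey r) ++ r :: pvGrp (l.drop (i + 1)) (pvKey r) := by
    conv_lhs => rw [← List.take_append_drop i l]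
    unfold pvGrp
    rw [List.filter_append, hdrop, List.filter_cons, if_pos (by exact beq_self_eq_true _)]
  have hPf : ((l.take i).map (pvMo l)).filter (fun q => pvKey q == pvKey r)
      = (pvGrp (l.take i) (pvKey r)).map
          (fun q => pvOrMerge q (pvBigOrAll (pvGrp l (pvKey r)))) := by
    rw [List.filter_map]
    unfold pvGrp
    rw [List.filter_congr (fun q hq => by
      simp only [Function.comp_apply]
      rw [(pv_Mo_ne_key l q hne (List.take_subset _ _ hq)).2])]
    apply List.map_congr_left
    intro q hq
    unfold pvMo
    rw [(pv_grp_all (l.take i) (pvKey r) q hq).2]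
    rfl
  have hscal : (l.drop (i + 1)).foldl pvG (((l.take i).map (pvMo l)).foldl pvG r)
      = pvMo l r := by
    rw [kf2.1, kf1.1]
    show pvBigOr (pvBigOr r _) _ = _
    unfold pvBigOr
    rw [← List.foldl_append, hPf]
    have hmain := pv_main (pvGrp (l.take i) (pvKey r)) (pvGrp (l.drop (i + 1)) (pvKey r))
        r (pvBigOrAll (pvGrp l (pvKey r))) (by rw [hsplit])
    unfold pvBigOr at hmain
    show _ = pvOrMerge r (pvBigOrAll (pvGrp l (pvKey r)))
    rw [← hmain]
    rfl
  rw [hdrop, show ((i : Int)) = (((l.take i).map (pvMo l)).length : Int) by rw [hP],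
      pv_inner_eval _ _ _ _ (by rw [hP]; simp; omega), hscal, htake]
  simp

-- ---- A characterised ----

theorem pv_outer (l : List (List Int)) (hne : ∀ row ∈ l, row ≠ []) :
    ∀ (d i : Nat), i + d = l.length → ∀ (fl : List (List Int)),
    (PySem.List.pyRange (i : Int) (l.length : Int) 1).foldl (pvOB (l.length : Int))
        ((l.take i).map (pvMo l) ++ l.drop i, fl)
      = (l.map (pvMo l), ((l.drop i).map (pvMo l)).foldl PySem.Set.add fl) := by
  intro d
  induction d with
  | zero =>
    intro i hd fl
    have hi : i = l.length := by omega
    subst hi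
    rw [PySem.List.pyRange_one_eq_nil (by omega)]
    simp
  | succ d ih =>
    intro i hd fl
    have hi : i < l.length := by omega
    rw [PySem.List.pyRange_one_cons (by exact_mod_cast hi)]
    rw [List.foldl_cons]
    have hP : ((l.take i).map (pvMo l)).length = i := by simp; omega
    have hdrop : l.drop i = l[i] :: l.drop (i + 1) := List.drop_eq_getElem_cons hi
    have htake : l.take (i + 1) = l.take i ++ [l[i]] := by
      rw [List.take_succ, List.getElem?_eq_getElem hi]
      rfl
    have hstep : pvOB (l.length : Int) ((l.take i).map (pvMo l) ++ l.drop i, fl) (i : Int)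
        = ((l.take (i + 1)).map (pvMo l) ++ l.drop (i + 1),
           PySem.Set.add fl (pvMo l l[i])) := by
      unfold pvOB
      dsimp only
      rw [pv_inner_full l hne i hi]
      have hrow : PySem.List.pyGetD ((l.take (i + 1)).map (pvMo l) ++ l.drop (i + 1)) (i : Int) []
          = pvMo l l[i] := by
        rw [htake, List.map_append, List.map_cons, List.map_nil, List.append_assoc,
            List.singleton_append,
            show ((i : Int)) = (((l.take i).map (pvMo l)).length : Int) by rw [hP]]
        exact pv_getD_mid _ _ _
      rw [hrow]
      unfold PySem.Set.add PySem.Set.contains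
      split_ifs with h <;> rfl
    rw [hstep]
    rw [show ((i : Int) + 1) = ((i + 1 : Nat) : Int) by push_cast; ring]
    rw [ih (i + 1) (by omega) (PySem.Set.add fl (pvMo l l[i]))]
    rw [hdrop, List.map_cons, List.foldl_cons]

theorem pv_A_char (l : List (List Int)) (hne : ∀ row ∈ l, row ≠ []) :
    change_final_list l = (l.map (pvMo l)).foldl PySem.Set.add [] := by
  have h := pv_outer l hne l.length 0 (by omega) []
  simp only [List.take_zero, List.map_nil, List.nil_append, List.drop_zero,
    Nat.cast_zero] at h
  unfold change_final_list
  exact congrArg Prod.snd h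

-- ===== VERDICT (by name: the statement is the Claim_ definition above) =====
theorem change_final_list_spec : Claim_equal_change_final_list := by
  intro l _ hpre
  unfold Spec_change_final_list
  rw [pv_A_char l hpre, pv_B_char l]
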